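-- pv_equiv track=rewrite | github.com/spawner1145/Eridanus | run/ai_llm/clients/eridanus_client.py | _split_safe
-- ===== SOURCE A (Python) =====
-- _TC_BEGIN = "@@TOOL_CALL_BEGIN@@"
--
-- def _split_safe(text: str):
--     """
--     若 text 中不含 _TC_BEGIN 也不含其任何前缀，则全部安全。
--     否则，找到最早可能是 _TC_BEGIN 前缀的位置，该位置之前的部分安全，之后继续缓冲。
--     """
--     marker = _TC_BEGIN
--     # 检查 text 是否含完整 marker
--     idx = text.find(marker)
--     if idx != -1:
--         # marker 完整出现，marker 前的部分安全
--         return text[:idx], text[idx:]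
--
--     # 检查 text 末尾是否是 marker 的某个前缀（防止 marker 被拆成两个 chunk）
--     for prefix_len in range(min(len(marker), len(text)), 0, -1):
--         if text.endswith(marker[:prefix_len]):
--             safe_end = len(text) - prefix_len
--             return text[:safe_end], text[safe_end:]
--
--     return text, ""
-- ===== SOURCE B (Python) =====
-- _TC_BEGIN = "@@TOOL_CALL_BEGIN@@"
--
-- def _split_safe(text: str):
--     """Single left-to-right scan over split positions: return at the earliest i
--     whose suffix could be (the start of) the marker — either the suffix is
--     shorter than the marker and is a prefix of it, or the marker occurs at i.
--     The empty suffix at i == len(text) always matches, giving (text, '')."""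
--     marker = _TC_BEGIN
--     n, m = len(text), len(marker)
--     for i in range(n + 1):
--         if n - i < m:
--             hit = marker.startswith(text[i:])
--         else:
--             hit = text.startswith(marker, i)
--         if hit:
--             return text[:i], text[i:]
-- ===== Notes on version B (the rewrite author's own statement) =====
-- stated objective: alternative
-- what changed: Replaced the find-then-descending-endswith-loop (two separate cases) with one ascending scan over split positions that returns at the first i where the suffix text[i:] is a prefix of the marker or starts with it; the empty suffix at i=len(text) gives the fallback.
import Mathlib
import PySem

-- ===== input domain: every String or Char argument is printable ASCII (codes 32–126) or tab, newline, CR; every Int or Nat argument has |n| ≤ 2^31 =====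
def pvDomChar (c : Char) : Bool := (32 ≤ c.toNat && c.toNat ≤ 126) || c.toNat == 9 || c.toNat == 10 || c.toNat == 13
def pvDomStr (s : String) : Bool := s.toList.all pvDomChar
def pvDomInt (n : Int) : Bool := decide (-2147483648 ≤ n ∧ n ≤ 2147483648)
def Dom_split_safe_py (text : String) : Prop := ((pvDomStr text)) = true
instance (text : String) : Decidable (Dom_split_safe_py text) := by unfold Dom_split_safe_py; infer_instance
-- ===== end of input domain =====

-- B replaces A's find-then-descending-endswith-loop by one ascending scan over split
-- positions, returning at the first i whose suffix is a prefix of the marker or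
-- starts with it (alternative decomposition, same cost).

-- ===== PORT A =====
def pvTCBegin : String := "@@TOOL_CALL_BEGIN@@"

-- A's 'for prefix_len in range(min(len(marker), len(text)), 0, -1)' loop, transliterated
def pvALoop (text marker : String) : Nat → String × String
  | 0 => (text, "")
  | p + 1 =>
    if PySem.Str.endswith text (PySem.Str.slice marker none (some ((p + 1 : Nat) : Int))) then
      (PySem.Str.slice text none (some ((PySem.Str.len text) - ((p + 1 : Nat) : Int))),
       PySem.Str.slice text (some ((PySem.Str.len text) - ((p + 1 : Nat) : Int))) none)
    else pvALoop text marker p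

def split_safe_py (text : String) : String × String :=
  let marker := pvTCBegin
  let idx := PySem.Str.find text marker
  if idx ≠ -1 then
    (PySem.Str.slice text none (some idx), PySem.Str.slice text (some idx) none)
  else
    pvALoop text marker ((min (PySem.Str.len marker) (PySem.Str.len text)).toNat)

-- ===== PORT B =====
-- B's 'for i in range(len(text) + 1)' loop, transliterated (fuel = remaining iterations)
-- text.startswith(marker, i) is ported exactly as text[i:].startswith(marker) (0 ≤ i)
def pvBLoop (text marker : String) : Nat → Nat → String × String
  | _, 0 => (text, "")
  | i, fuel + 1 =>
    let hit := if PySem.Str.len text - (i : Int) < PySem.Str.len marker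
      then PySem.Str.startswith marker (PySem.Str.slice text (some (i : Int)) none)
      else PySem.Str.startswith (PySem.Str.slice text (some (i : Int)) none) marker
    if hit then
      (PySem.Str.slice text none (some (i : Int)), PySem.Str.slice text (some (i : Int)) none)
    else pvBLoop text marker (i + 1) fuel

def split_safe_py_alt (text : String) : String × String :=
  pvBLoop text pvTCBegin 0 ((PySem.Str.len text).toNat + 1)

-- ===== PRECONDITION & SPEC =====
def Spec_split_safe_py (text : String) (out : String × String) : Prop := out = split_safe_py_alt text
instance (text : String) (out : String × String) : Decidable (Spec_split_safe_py text out) := by unfold Spec_split_safe_py; infer_instance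

-- ===== CLAIM (what is proved, stated in full; the proofs are below) =====
def Claim_equal_split_safe_py : Prop := ∀ (text : String), Dom_split_safe_py text → Spec_split_safe_py text (split_safe_py text)

-- ===== LEMMAS AND PROOFS =====

-- the split predicate B tests at position i
def pvP (t m : List Char) (i : Nat) : Prop := m <+: t.drop i ∨ t.drop i <+: m

theorem pvStrEq {a b : String} (h : a.toList = b.toList) : a = b :=
  String.toList_inj.mp h

theorem pvCond_iff (text marker : String) (i : Nat) (hm : 1 ≤ marker.toList.length) :
    ((if PySem.Str.len text - (i : Int) < PySem.Str.len marker
      then PySem.Str.startswith marker (PySem.Str.slice text (some (i : Int)) none)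
      else PySem.Str.startswith (PySem.Str.slice text (some (i : Int)) none) marker) = true)
      ↔ pvP text.toList marker.toList i := by
  have hlen : PySem.Str.len text = (text.toList.length : Int) := by simp
  have hlenm : PySem.Str.len marker = (marker.toList.length : Int) := by simp
  have hd : (PySem.Str.slice text (some (i : Int)) none).toList = text.toList.drop i := by
    simp [PySem.List.slice_from_natCast]
  have hdl : (text.toList.drop i).length = text.toList.length - i := List.length_drop
  rw [hlen, hlenm]
  split_ifs with h
  · -- suffix shorter than the marker: test 'suffix <+: marker'
    constructor
    · intro hs
      refine Or.inr ?_
      have := (PySem.Chars.startswith_iff marker.toList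
        (PySem.Str.slice text (some (i : Int)) none).toList).mp (by simpa using hs)
      rwa [hd] at this
    · rintro (hp | hp)
      · exfalso
        have h1 := hp.length_le
        rw [hdl] at h1
        omega
      · have : PySem.Chars.startswith marker.toList (text.toList.drop i) = true :=
          (PySem.Chars.startswith_iff _ _).mpr hp
        simpa [hd] using this
  · -- suffix at least marker-length: test 'marker occurs at i'
    constructor
    · intro hs
      refine Or.inl ?_
      have := (PySem.Chars.startswith_iff
        (PySem.Str.slice text (some (i : Int)) none).toList marker.toList).mp (by simpa using hs)
      rwa [hd] at this
    · rintro (hp | hp)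
      · have : PySem.Chars.startswith (text.toList.drop i) marker.toList = true :=
          (PySem.Chars.startswith_iff _ _).mpr hp
        simpa [hd] using this
      · have h1 := hp.length_le
        rw [hdl] at h1
        have h2 : marker.toList.length ≤ (text.toList.drop i).length := by
          rw [hdl]; omega
        have heq : text.toList.drop i = marker.toList := hp.eq_of_length_le h2
        have : PySem.Chars.startswith (text.toList.drop i) marker.toList = true :=
          (PySem.Chars.startswith_iff _ _).mpr (heq ▸ List.prefix_refl _)
        simpa [hd] using this

theorem pvEnds_iff (text marker : String) (q : Nat) :
    (PySem.Str.endswith text (PySem.Str.slice marker none (some (q:Int))) = true)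
      ↔ marker.toList.take q <:+ text.toList := by
  simp [PySem.Chars.endswith_iff, PySem.List.slice_to_natCast]

-- B's loop returns at the least position satisfying pvP
theorem pvBLoop_eq (text marker : String) (k : Nat)
    (hm : 1 ≤ marker.toList.length)
    (hk : pvP text.toList marker.toList k)
    (hmin : ∀ j, j < k → ¬ pvP text.toList marker.toList j) :
    ∀ fuel i, i ≤ k → k < i + fuel →
      pvBLoop text marker i fuel =
        (PySem.Str.slice text none (some (k : Int)),
         PySem.Str.slice text (some (k : Int)) none) := by
  intro fuel
  induction fuel with
  | zero => intro i h1 h2; omega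
  | succ n ih =>
    intro i h1 h2
    rw [pvBLoop]
    by_cases hPi : pvP text.toList marker.toList i
    · have hik : i = k := by
        rcases Nat.lt_or_ge i k with h | h
        · exact absurd hPi (hmin i h)
        · omega
      subst hik
      rw [if_pos ((pvCond_iff text marker i hm).mpr hPi)]
    · rw [if_neg (fun hc => hPi ((pvCond_iff text marker i hm).mp hc))]
      have hlt : i < k := lt_of_le_of_ne h1 (fun h => hPi (h ▸ hk))
      exact ih (i+1) hlt (by omega)

-- A's descending loop when prefix length p succeeds and every larger one fails
theorem pvALoop_found (text marker : String) (p : Nat)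
    (hc : PySem.Str.endswith text (PySem.Str.slice marker none (some (p : Int))) = true)
    (hp : 1 ≤ p) :
    ∀ (start : Nat), p ≤ start →
      (∀ q, p < q → q ≤ start →
        PySem.Str.endswith text (PySem.Str.slice marker none (some (q : Int))) = false) →
      pvALoop text marker start =
        (PySem.Str.slice text none (some ((PySem.Str.len text) - (p : Int))),
         PySem.Str.slice text (some ((PySem.Str.len text) - (p : Int))) none) := by
  intro start
  induction start with
  | zero => intro h1 _; omega
  | succ n ih =>
    intro h1 h2
    rw [pvALoop]
    by_cases hpn : p = n + 1
    · subst hpn; rw [if_pos hc]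
    · rw [if_neg (by simpa using h2 (n+1) (by omega) (by omega))]
      exact ih (by omega) (fun q hq1 hq2 => h2 q hq1 (by omega))

-- A's descending loop when every prefix length fails
theorem pvALoop_none (text marker : String) :
    ∀ (start : Nat),
      (∀ q, 1 ≤ q → q ≤ start →
        PySem.Str.endswith text (PySem.Str.slice marker none (some (q : Int))) = false) →
      pvALoop text marker start = (text, "") := by
  intro start
  induction start with
  | zero => intro _; rw [pvALoop]
  | succ n ih =>
    intro h
    rw [pvALoop]
    rw [if_neg (by simpa using h (n+1) (by omega) (by omega))]
    exact ih (fun q hq1 hq2 => h q hq1 (by omega))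

theorem pvMain (text : String) : split_safe_py text = split_safe_py_alt text := by
  have hm19 : pvTCBegin.toList.length = 19 := by decide
  have hlen : PySem.Str.len text = (text.toList.length : Int) := by simp
  have hfuel : (PySem.Str.len text).toNat = text.toList.length := by simp
  by_cases hfind : PySem.Str.find text pvTCBegin = -1
  · -- no full marker in text
    have hninf : ¬ (pvTCBegin.toList <:+: text.toList) := by
      have h2 := hfind
      rw [PySem.Str.find_eq] at h2
      exact (PySem.Chars.find_eq_neg_one_iff _ _).mp h2
    have hnopre : ∀ j, ¬ (pvTCBegin.toList <+: text.toList.drop j) := by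
      intro j h
      exact hninf (h.isInfix.trans (List.drop_suffix j text.toList).isInfix)
    have hex : ∃ j, text.toList.drop j <+: pvTCBegin.toList :=
      ⟨text.toList.length, by rw [List.drop_length]; exact List.nil_prefix⟩
    set k := Nat.find hex with hkdef
    have hkQ : text.toList.drop k <+: pvTCBegin.toList := Nat.find_spec hex
    have hklen : k ≤ text.toList.length :=
      Nat.find_le (by rw [List.drop_length]; exact List.nil_prefix)
    have hmin : ∀ j, j < k → ¬ pvP text.toList pvTCBegin.toList j := by
      intro j hj h
      exact h.elim (hnopre j) (Nat.find_min hex hj)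
    have hB : split_safe_py_alt text =
        (PySem.Str.slice text none (some (k : Int)),
         PySem.Str.slice text (some (k : Int)) none) := by
      rw [split_safe_py_alt, hfuel]
      exact pvBLoop_eq text pvTCBegin k (by rw [hm19]; omega) (Or.inr hkQ) hmin _ 0 (by omega) (by omega)
    have hmn : (min (PySem.Str.len pvTCBegin) (PySem.Str.len text)).toNat
        = min 19 text.toList.length := by
      have : PySem.Str.len pvTCBegin = 19 := by simp [hm19]
      rw [this, hlen]; omega
    rw [split_safe_py]
    rw [if_neg (fun h => h hfind), hmn]
    rcases Nat.lt_or_ge k text.toList.length with hkl | hkl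
    · -- a proper trailing prefix of the marker: length p = len - k
      set p := text.toList.length - k with hpdef
      have hp1 : 1 ≤ p := by omega
      have hplen : (text.toList.drop k).length = p := by simp [hpdef]
      have hp19 : p ≤ 19 := by
        have := hkQ.length_le; rw [hplen, hm19] at this; exact this
      have hdropeq : text.toList.drop k = pvTCBegin.toList.take p := by
        have := List.prefix_iff_eq_take.mp hkQ
        rwa [hplen] at this
      have hc : PySem.Str.endswith text
          (PySem.Str.slice pvTCBegin none (some (p : Int))) = true := by
        rw [pvEnds_iff, ← hdropeq]
        exact List.drop_suffix k text.toList
      have hfail : ∀ q, p < q → q ≤ min 19 text.toList.length →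
          PySem.Str.endswith text
            (PySem.Str.slice pvTCBegin none (some (q : Int))) = false := by
        intro q hq1 hq2
        by_contra hne
        have htrue : PySem.Str.endswith text
            (PySem.Str.slice pvTCBegin none (some (q : Int))) = true := by
          revert hne; cases (PySem.Str.endswith text
            (PySem.Str.slice pvTCBegin none (some (q : Int)))) <;> simp
        have hsuf : pvTCBegin.toList.take q <:+ text.toList :=
          (pvEnds_iff text pvTCBegin q).mp htrue
        have hqlen : (pvTCBegin.toList.take q).length = q := by
          rw [List.length_take, hm19]; omega
        have hdq : pvTCBegin.toList.take q
            = text.toList.drop (text.toList.length - q) := by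
          have := List.suffix_iff_eq_drop.mp hsuf
          rwa [hqlen] at this
        have hQ : text.toList.drop (text.toList.length - q) <+: pvTCBegin.toList := by
          rw [← hdq]; exact List.take_prefix q pvTCBegin.toList
        exact Nat.find_min hex (by omega) hQ
      rw [pvALoop_found text pvTCBegin p hc hp1 (min 19 text.toList.length)
          (by omega) hfail, hB]
      have hcast : PySem.Str.len text - (p : Int) = (k : Int) := by
        rw [hlen]; omega
      rw [hcast]
    · -- k = len: nothing to buffer
      have hkeq : k = text.toList.length := by omega
      have hfail : ∀ q, 1 ≤ q → q ≤ min 19 text.toList.length →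
          PySem.Str.endswith text
            (PySem.Str.slice pvTCBegin none (some (q : Int))) = false := by
        intro q hq1 hq2
        by_contra hne
        have htrue : PySem.Str.endswith text
            (PySem.Str.slice pvTCBegin none (some (q : Int))) = true := by
          revert hne; cases (PySem.Str.endswith text
            (PySem.Str.slice pvTCBegin none (some (q : Int)))) <;> simp
        have hsuf : pvTCBegin.toList.take q <:+ text.toList :=
          (pvEnds_iff text pvTCBegin q).mp htrue
        have hqlen : (pvTCBegin.toList.take q).length = q := by
          rw [List.length_take, hm19]; omega
        have hdq : pvTCBegin.toList.take q
            = text.toList.drop (text.toList.length - q) := by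
          have := List.suffix_iff_eq_drop.mp hsuf
          rwa [hqlen] at this
        have hQ : text.toList.drop (text.toList.length - q) <+: pvTCBegin.toList := by
          rw [← hdq]; exact List.take_prefix q pvTCBegin.toList
        exact Nat.find_min hex (by omega) hQ
      rw [pvALoop_none text pvTCBegin (min 19 text.toList.length) hfail, hB]
      have e1 : PySem.Str.slice text none (some (k : Int)) = text := by
        apply pvStrEq
        rw [hkeq]
        simp [PySem.List.slice_to_natCast]
      have e2 : PySem.Str.slice text (some (k : Int)) none = "" := by
        apply pvStrEq
        rw [hkeq]
        simp [PySem.List.slice_from_natCast]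
      rw [e1, e2]
  · -- full marker occurs: split at the first occurrence
    have h0 : (0:Int) ≤ PySem.Chars.find text.toList pvTCBegin.toList := by
      have h2 := hfind
      rw [PySem.Str.find_eq] at h2
      exact (PySem.Chars.find_nonneg_iff _ _).mpr ((PySem.Chars.find_ne_neg_one_iff _ _).mp h2)
    have hSC : PySem.Str.find text pvTCBegin
        = PySem.Chars.find text.toList pvTCBegin.toList := PySem.Str.find_eq _ _
    set k := (PySem.Chars.find text.toList pvTCBegin.toList).toNat with hkdef
    have hidx : PySem.Str.find text pvTCBegin = (k : Int) := by
      rw [hSC, hkdef, Int.toNat_of_nonneg h0]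
    obtain ⟨hpre, hfirst⟩ := PySem.Chars.find_spec h0
    have h19 : 19 ≤ text.toList.length - k := by
      have := hpre.length_le
      rw [hm19, List.length_drop] at this
      exact this
    have hklen : k ≤ text.toList.length := by omega
    have hmin : ∀ j, j < k → ¬ pvP text.toList pvTCBegin.toList j := by
      intro j hj h
      rcases h with h | h
      · exact hfirst j hj h
      · have := h.length_le
        rw [List.length_drop, hm19] at this
        omega
    have hB : split_safe_py_alt text =
        (PySem.Str.slice text none (some (k : Int)),
         PySem.Str.slice text (some (k : Int)) none) := by
      rw [split_safe_py_alt, hfuel]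
      exact pvBLoop_eq text pvTCBegin k (by rw [hm19]; omega) (Or.inl hpre) hmin _ 0 (by omega) (by omega)
    rw [split_safe_py]
    rw [if_pos hfind, hidx, hB]

-- ===== VERDICT (by name: the statement is the Claim_ definition above) =====
theorem split_safe_py_spec : Claim_equal_split_safe_py := by
  intro text _
  exact pvMain text
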